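-- pv_equiv track=rewrite | github.com/Bright-L01/proof-sketcher | src/proof_sketcher/parser/enhanced_parser.py | _extract_inductive_content
-- ===== SOURCE A (Python) =====
-- from typing import Dict, List, Optional, Set, Match
--
-- def _extract_inductive_content(lines: List[str], start_line: int) -> tuple[str, List[Dict[str, str]], List[str], int]:
--     """Extract inductive type content."""
--     # Simplified implementation - would need complex parsing for full support
--     type_sig = ""
--     constructors = []
--     derives = []
--
--     i = start_line
--     while i < len(lines) and not lines[i].strip().startswith('end'):
--         line = lines[i].strip()
--         if line.startswith('|'):
--             # Constructor
--             constructor_name = line.split(':')[0].replace('|', '').strip()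
--             constructor_type = line.split(':')[1].strip() if ':' in line else ""
--             constructors.append({"name": constructor_name, "type": constructor_type})
--         elif 'deriving' in line:
--             # Derives clause
--             derives_part = line.split('deriving')[1].strip()
--             derives = [d.strip() for d in derives_part.split(',')]
--         elif i == start_line:
--             # Type signature
--             type_sig = line
--         i += 1
--
--     return type_sig, constructors, derives, i
-- ===== SOURCE B (Python) =====
-- from typing import Dict, List
--
--
-- def _extract_inductive_content(lines: List[str], start_line: int) -> tuple[str, List[Dict[str, str]], List[str], int]:
--     """Extract inductive type content (boundary-first decomposition)."""
--     n = len(lines)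
--     # boundary: first index >= start_line whose stripped line starts with 'end'
--     j = start_line
--     while j < n and not lines[j].strip().startswith('end'):
--         j += 1
--
--     body = [lines[k].strip() for k in range(start_line, j)]
--
--     constructors = [
--         {"name": ln.split(':')[0].replace('|', '').strip(),
--          "type": ln.split(':')[1].strip() if ':' in ln else ""}
--         for ln in body if ln.startswith('|')
--     ]
--
--     last = next((ln for ln in reversed(body)
--                  if not ln.startswith('|') and 'deriving' in ln), None)
--     derives = [d.strip() for d in last.split('deriving')[1].strip().split(',')] if last is not None else []
--
--     first = body[0] if body else None
--     type_sig = first if first is not None and not first.startswith('|') and 'deriving' not in first else ""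
--
--     return type_sig, constructors, derives, j
-- ===== Notes on version B (the rewrite author's own statement) =====
-- stated objective: alternative
-- what changed: Instead of one stateful while-loop that classifies each line as it walks, B first finds the boundary index j of the 'end' line, materialises the stripped body slice, and computes the four results independently: constructors by a filter+map comprehension, derives by a first-match search over the reversed body, and type_sig by inspecting only the first body line.
import Mathlib
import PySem

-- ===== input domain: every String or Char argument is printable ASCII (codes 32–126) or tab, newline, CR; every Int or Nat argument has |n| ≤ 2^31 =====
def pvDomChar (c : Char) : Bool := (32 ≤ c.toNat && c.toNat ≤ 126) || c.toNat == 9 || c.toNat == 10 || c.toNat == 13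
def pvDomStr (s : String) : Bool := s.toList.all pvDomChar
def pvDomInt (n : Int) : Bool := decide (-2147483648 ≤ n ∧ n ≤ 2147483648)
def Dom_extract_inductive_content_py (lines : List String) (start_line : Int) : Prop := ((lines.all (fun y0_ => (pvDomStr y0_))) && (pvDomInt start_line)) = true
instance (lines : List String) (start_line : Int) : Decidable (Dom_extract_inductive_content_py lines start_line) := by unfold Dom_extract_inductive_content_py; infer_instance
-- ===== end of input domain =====

-- B replaces A's single stateful while-loop by a boundary-first decomposition (find the 'end' index,
-- then independent passes over the body slice); same cost ("alternative"), return value only.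

-- ===== PORT A =====
-- A's while-loop: state (i, type_sig, constructors, derives); fuel only makes the loop total
-- (fuel = len(lines)-start_line suffices: i increases by 1 and the loop stops once i >= len);
-- lines[i] is pyGet? (IndexError → Pre_)
def eicLoopA (lines : List String) (start_line : Int) : Nat → Int → String →
    List (List (String × String)) → List String →
    String × (List (List (String × String))) × List String × Int
  | 0, i, tsig, cons, der => (tsig, cons, der, i)
  | fuel + 1, i, tsig, cons, der =>
    if i < (lines.length : Int) then
      if PySem.Str.startswith (PySem.Str.strip ((PySem.List.pyGet? lines i).getD "")) "end" then
        (tsig, cons, der, i)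
      else if PySem.Str.startswith (PySem.Str.strip ((PySem.List.pyGet? lines i).getD "")) "|" then
        -- constructor: name = line.split(':')[0].replace('|','').strip(), type = line.split(':')[1].strip() if ':' in line else ""
        eicLoopA lines start_line fuel (i + 1) tsig
          (cons ++ [[("name", PySem.Str.strip (PySem.Str.replace (((PySem.Str.split? (PySem.Str.strip ((PySem.List.pyGet? lines i).getD "")) ":").getD []).getD 0 "") "|" "")),
                     ("type", if PySem.Str.isIn ":" (PySem.Str.strip ((PySem.List.pyGet? lines i).getD "")) then PySem.Str.strip (((PySem.Str.split? (PySem.Str.strip ((PySem.List.pyGet? lines i).getD "")) ":").getD []).getD 1 "") else "")]]) der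
      else if PySem.Str.isIn "deriving" (PySem.Str.strip ((PySem.List.pyGet? lines i).getD "")) then
        -- derives = [d.strip() for d in line.split('deriving')[1].strip().split(',')]
        eicLoopA lines start_line fuel (i + 1) tsig cons
          (((PySem.Str.split? (PySem.Str.strip (((PySem.Str.split? (PySem.Str.strip ((PySem.List.pyGet? lines i).getD "")) "deriving").getD []).getD 1 "")) ",").getD []).map PySem.Str.strip)
      else if i = start_line then
        eicLoopA lines start_line fuel (i + 1) (PySem.Str.strip ((PySem.List.pyGet? lines i).getD "")) cons der
      else
        eicLoopA lines start_line fuel (i + 1) tsig cons der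
    else (tsig, cons, der, i)

def extract_inductive_content_py (lines : List String) (start_line : Int) : String × (List (List (String × String))) × List String × Int :=
  eicLoopA lines start_line ((lines.length : Int) - start_line).toNat start_line "" [] []

-- ===== PORT B =====
-- Source B's boundary loop: first index j ≥ start_line with lines[j].strip().startswith('end'),
-- else len(lines); same sufficient fuel makes it total
def eicFindEnd (lines : List String) : Nat → Int → Int
  | 0, j => j
  | fuel + 1, j =>
    if j < (lines.length : Int) then
      if PySem.Str.startswith (PySem.Str.strip ((PySem.List.pyGet? lines j).getD "")) "end" then j
      else eicFindEnd lines fuel (j + 1)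
    else j

-- Source B's constructor dict for one '|' line
def eicCons (ln : String) : List (String × String) :=
  [("name", PySem.Str.strip (PySem.Str.replace (((PySem.Str.split? ln ":").getD []).getD 0 "") "|" "")),
   ("type", if PySem.Str.isIn ":" ln then PySem.Str.strip (((PySem.Str.split? ln ":").getD []).getD 1 "") else "")]

-- Source B's derives list from one deriving line
def eicDer (ln : String) : List String :=
  ((PySem.Str.split? (PySem.Str.strip (((PySem.Str.split? ln "deriving").getD []).getD 1 "")) ",").getD []).map PySem.Str.strip

def extract_inductive_content_py_alt (lines : List String) (start_line : Int) : String × (List (List (String × String))) × List String × Int :=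
  let j := eicFindEnd lines ((lines.length : Int) - start_line).toNat start_line
  let body := (PySem.List.pyRange start_line j 1).map
    (fun k => PySem.Str.strip ((PySem.List.pyGet? lines k).getD ""))
  let constructors := (body.filter (fun ln => PySem.Str.startswith ln "|")).map eicCons
  let derives :=
    match body.reverse.find? (fun ln => !(PySem.Str.startswith ln "|") && PySem.Str.isIn "deriving" ln) with
    | some ln => eicDer ln
    | none => []
  let type_sig :=
    match body with
    | [] => ""
    | b0 :: _ => if !(PySem.Str.startswith b0 "|") && !(PySem.Str.isIn "deriving" b0) then b0 else ""
  (type_sig, constructors, derives, j)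

-- ===== PRECONDITION & SPEC =====
-- Pre_ excludes exactly the inputs where A raises IndexError (negative index below -len(lines))
def Pre_extract_inductive_content_py (lines : List String) (start_line : Int) : Prop :=
  -(lines.length : Int) ≤ start_line
instance (lines : List String) (start_line : Int) : Decidable (Pre_extract_inductive_content_py lines start_line) := by unfold Pre_extract_inductive_content_py; infer_instance

def pvWitness_extract_inductive_content_py : List String × Int :=
  (["inductive Foo where", "| a : Nat", "| b", "  deriving Repr, BEq", "end Foo"], 0)

def Spec_extract_inductive_content_py (lines : List String) (start_line : Int) (out : String × (List (List (String × String))) × List String × Int) : Prop := out = extract_inductive_content_py_alt lines start_line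
instance (lines : List String) (start_line : Int) (out : String × (List (List (String × String))) × List String × Int) : Decidable (Spec_extract_inductive_content_py lines start_line out) := by unfold Spec_extract_inductive_content_py; infer_instance

-- ===== CLAIM (what is proved, stated in full; the proofs are below) =====
def Claim_equal_extract_inductive_content_py : Prop := ∀ (lines : List String) (start_line : Int), Dom_extract_inductive_content_py lines start_line → Pre_extract_inductive_content_py lines start_line → Spec_extract_inductive_content_py lines start_line (extract_inductive_content_py lines start_line)

-- ===== LEMMAS AND PROOFS =====

-- proof-side names for B's passes
def eicLine (lines : List String) (k : Int) : String :=
  PySem.Str.strip ((PySem.List.pyGet? lines k).getD "")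

def eicSeg (lines : List String) (a b : Int) : List String :=
  (PySem.List.pyRange a b 1).map (fun k => eicLine lines k)

def eicConsOf (s : List String) : List (List (String × String)) :=
  (s.filter (fun ln => PySem.Str.startswith ln "|")).map eicCons

def eicDerOf (s : List String) (der : List String) : List String :=
  match s.reverse.find? (fun ln => !(PySem.Str.startswith ln "|") && PySem.Str.isIn "deriving" ln) with
  | some ln => eicDer ln
  | none => der

def eicTsig (s : List String) (tsig : String) : String :=
  match s with
  | [] => tsig
  | b0 :: _ => if !(PySem.Str.startswith b0 "|") && !(PySem.Str.isIn "deriving" b0) then b0 else tsig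

theorem pvNeTrue {b : Bool} (h : ¬ b = true) : b = false := by
  cases b
  · rfl
  · exact absurd rfl h

theorem pvBoolAnd {p q : Bool} (h : (!p && q) = true) : p = false ∧ q = true := by
  cases p <;> cases q <;> simp_all

theorem pvBoolAnd2 {p q : Bool} (h : (!p && !q) = true) : p = false ∧ q = false := by
  cases p <;> cases q <;> simp_all

theorem pvBoolAndI {p q : Bool} (h1 : p = false) (h2 : q = true) : (!p && q) = true := by
  subst h1; subst h2; rfl

theorem pvBoolAnd2I {p q : Bool} (h1 : p = false) (h2 : q = false) : (!p && !q) = true := by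
  subst h1; subst h2; rfl

theorem le_eicFindEnd (lines : List String) (fuel : Nat) (j : Int) :
    j ≤ eicFindEnd lines fuel j := by
  induction fuel generalizing j with
  | zero => exact le_refl j
  | succ f ih =>
    simp only [eicFindEnd]
    by_cases h : j < (lines.length : Int)
    · rw [if_pos h]
      by_cases he : PySem.Str.startswith (PySem.Str.strip ((PySem.List.pyGet? lines j).getD "")) "end" = true
      · rw [if_pos he]
      · rw [if_neg he]
        have := ih (j + 1)
        omega
    · rw [if_neg h]

theorem eicSeg_nil (lines : List String) (a b : Int) (h : b ≤ a) : eicSeg lines a b = [] := by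
  unfold eicSeg
  rw [PySem.List.pyRange_one_eq_nil h, List.map_nil]

theorem eicSeg_cons (lines : List String) (a b : Int) (hab : a < b) :
    eicSeg lines a b = eicLine lines a :: eicSeg lines (a + 1) b := by
  unfold eicSeg
  rw [PySem.List.pyRange_one_cons hab, List.map_cons]

theorem eicConsOf_nil : eicConsOf [] = [] := rfl

theorem eicDerOf_nil (der : List String) : eicDerOf [] der = der := rfl

theorem eicTsig_nil (t : String) : eicTsig [] t = t := rfl

theorem eicTsig_cons (l : String) (s : List String) (t : String) :
    eicTsig (l :: s) t =
      if (!(PySem.Str.startswith l "|") && !(PySem.Str.isIn "deriving" l)) = true then l else t := rfl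

theorem pvFindSingleton {α : Type} (p : α → Bool) (a : α) :
    List.find? p [a] = if p a = true then some a else none := by
  cases h : p a <;> simp [List.find?, h]

theorem eicConsOf_cons (l : String) (s : List String) :
    eicConsOf (l :: s) =
      (if PySem.Str.startswith l "|" = true then [eicCons l] else []) ++ eicConsOf s := by
  unfold eicConsOf
  rw [List.filter_cons]
  by_cases hb : PySem.Str.startswith l "|" = true
  · rw [if_pos hb, List.map_cons, if_pos hb]
    rfl
  · rw [if_neg hb, if_neg hb]
    rfl

theorem eicDerOf_cons (l : String) (s : List String) (der : List String) :
    eicDerOf (l :: s) der =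
      eicDerOf s (if (!(PySem.Str.startswith l "|") && PySem.Str.isIn "deriving" l) = true
                  then eicDer l else der) := by
  unfold eicDerOf
  rw [List.reverse_cons, List.find?_append]
  cases hf : s.reverse.find? (fun ln => !(PySem.Str.startswith ln "|") && PySem.Str.isIn "deriving" ln) with
  | some ln => simp
  | none =>
    rw [pvFindSingleton]
    by_cases hb : (!(PySem.Str.startswith l "|") && PySem.Str.isIn "deriving" l) = true
    · rw [if_pos hb, if_pos hb]
      rfl
    · rw [if_neg hb, if_neg hb]
      rfl

-- A's loop from index i computes B's passes over the remaining segment; tsig is updated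
-- only when the loop is entered at i = start_line with a plain first line
theorem eicLoopA_eq (lines : List String) (start_line : Int) (fuel : Nat) (i : Int)
    (hi : start_line ≤ i) (hf : ((lines.length : Int) - i).toNat ≤ fuel)
    (tsig : String) (cons : List (List (String × String))) (der : List String) :
    eicLoopA lines start_line fuel i tsig cons der =
      ((if i = start_line then eicTsig (eicSeg lines i (eicFindEnd lines fuel i)) tsig else tsig),
       cons ++ eicConsOf (eicSeg lines i (eicFindEnd lines fuel i)),
       eicDerOf (eicSeg lines i (eicFindEnd lines fuel i)) der,
       eicFindEnd lines fuel i) := by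
  induction fuel generalizing i tsig cons der with
  | zero =>
    simp only [eicLoopA, eicFindEnd]
    rw [eicSeg_nil lines i i le_rfl, eicConsOf_nil, eicDerOf_nil, eicTsig_nil, ite_self,
      List.append_nil]
  | succ f ih =>
    simp only [eicLoopA, eicFindEnd]
    by_cases hlen : i < (lines.length : Int)
    · rw [if_pos hlen, if_pos hlen]
      by_cases hend : PySem.Str.startswith (PySem.Str.strip ((PySem.List.pyGet? lines i).getD "")) "end" = true
      · rw [if_pos hend, if_pos hend, eicSeg_nil lines i i le_rfl, eicConsOf_nil, eicDerOf_nil,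
          eicTsig_nil, ite_self, List.append_nil]
      · rw [if_neg hend, if_neg hend]
        have hlt : i < eicFindEnd lines f (i + 1) := by
          have := le_eicFindEnd lines f (i + 1)
          omega
        rw [eicSeg_cons lines i _ hlt, eicDerOf_cons, eicConsOf_cons, eicTsig_cons]
        by_cases hbar : PySem.Str.startswith (PySem.Str.strip ((PySem.List.pyGet? lines i).getD "")) "|" = true
        · have hbar' : PySem.Str.startswith (eicLine lines i) "|" = true := hbar
          have hders : ¬ (!(PySem.Str.startswith (eicLine lines i) "|") && PySem.Str.isIn "deriving" (eicLine lines i)) = true := by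
            intro hc
            have h1 := (pvBoolAnd hc).1
            rw [h1] at hbar'
            exact Bool.noConfusion hbar'
          have hts : ¬ (!(PySem.Str.startswith (eicLine lines i) "|") && !(PySem.Str.isIn "deriving" (eicLine lines i))) = true := by
            intro hc
            have h1 := (pvBoolAnd2 hc).1
            rw [h1] at hbar'
            exact Bool.noConfusion hbar'
          rw [if_pos hbar, if_pos hbar', if_neg hders, if_neg hts, ite_self]
          rw [ih (i + 1) (by omega) (by omega), if_neg (show ¬ i + 1 = start_line by omega)]
          rw [List.append_assoc]
          rfl
        · have hbar' : ¬ PySem.Str.startswith (eicLine lines i) "|" = true := hbar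
          by_cases hder : PySem.Str.isIn "deriving" (PySem.Str.strip ((PySem.List.pyGet? lines i).getD "")) = true
          · have hder' : PySem.Str.isIn "deriving" (eicLine lines i) = true := hder
            have hdery : (!(PySem.Str.startswith (eicLine lines i) "|") && PySem.Str.isIn "deriving" (eicLine lines i)) = true :=
              pvBoolAndI (pvNeTrue hbar') hder'
            have hts : ¬ (!(PySem.Str.startswith (eicLine lines i) "|") && !(PySem.Str.isIn "deriving" (eicLine lines i))) = true := by
              intro hc
              have h2 := (pvBoolAnd2 hc).2
              rw [h2] at hder'
              exact Bool.noConfusion hder'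
            rw [if_neg hbar, if_pos hder, if_neg hbar', if_pos hdery, if_neg hts, ite_self]
            rw [ih (i + 1) (by omega) (by omega), if_neg (show ¬ i + 1 = start_line by omega)]
            rfl
          · have hder' : ¬ PySem.Str.isIn "deriving" (eicLine lines i) = true := hder
            have hdern : ¬ (!(PySem.Str.startswith (eicLine lines i) "|") && PySem.Str.isIn "deriving" (eicLine lines i)) = true := by
              intro hc
              exact hder' (pvBoolAnd hc).2
            by_cases hst : i = start_line
            · have hts : (!(PySem.Str.startswith (eicLine lines i) "|") && !(PySem.Str.isIn "deriving" (eicLine lines i))) = true :=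
                pvBoolAnd2I (pvNeTrue hbar') (pvNeTrue hder')
              rw [if_neg hbar, if_neg hder, if_pos hst, if_neg hbar', if_neg hdern, if_pos hst, if_pos hts]
              rw [ih (i + 1) (by omega) (by omega), if_neg (show ¬ i + 1 = start_line by omega)]
              rfl
            · rw [if_neg hbar, if_neg hder, if_neg hst, if_neg hbar', if_neg hdern, if_neg hst]
              rw [ih (i + 1) (by omega) (by omega), if_neg (show ¬ i + 1 = start_line by omega)]
              rfl
    · rw [if_neg hlen, if_neg hlen, eicSeg_nil lines i i le_rfl, eicConsOf_nil, eicDerOf_nil,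
        eicTsig_nil, ite_self, List.append_nil]

-- ===== VERDICT (by name: the statement is the Claim_ definition above) =====
theorem extract_inductive_content_py_spec : Claim_equal_extract_inductive_content_py := by
  intro lines s _hdom _hpre
  show extract_inductive_content_py lines s = extract_inductive_content_py_alt lines s
  unfold extract_inductive_content_py
  rw [eicLoopA_eq lines s (((lines.length : Int) - s).toNat) s le_rfl le_rfl "" [] [], if_pos rfl]
  rfl
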